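-- pv_equiv track=rewrite | github.com/szapf70/codecomp | faw/002_kvb_opendata/loesungen/hirsch sawade gawarzewski dari/definition_library_AD_leicht.py | most_connections
-- ===== SOURCE A (Python) =====
-- def most_connections(dataset):
--     """
--     Searching station area with most connections
--
--     Parameter:
--         dataset: containing station_area_data information "linien"
--
--     Return:
--         list: VRS numbers (vrsnumber_list)
--         int:  count of most connections (most_connections)
--     """
--     vrsnumber_list = list()
--     most_connections_count:int = 0
--
--     for station_area_data in dataset:
--         if len(dataset[station_area_data]["linien"]) == most_connections_count:
--            vrsnumber_list.append(station_area_data)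
--
--         if len(dataset[station_area_data]["linien"]) > most_connections_count:
--             most_connections_count = len(dataset[station_area_data]["linien"])
--             vrsnumber_list = [station_area_data]
--
--     return  most_connections_count, vrsnumber_list
-- ===== SOURCE B (Python) =====
-- def most_connections(dataset):
--     if not dataset:
--         return 0, []
--     m = max(len(dataset[k]["linien"]) for k in dataset)
--     return m, [k for k in dataset if len(dataset[k]["linien"]) == m]
-- ===== Notes on version B (the rewrite author's own statement) =====
-- stated objective: simpler
-- what changed: Replaces A's single accumulating scan (running max plus append/reset list state) with an empty guard, a max() pass, and a filter comprehension at the final maximum.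
import Mathlib
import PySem

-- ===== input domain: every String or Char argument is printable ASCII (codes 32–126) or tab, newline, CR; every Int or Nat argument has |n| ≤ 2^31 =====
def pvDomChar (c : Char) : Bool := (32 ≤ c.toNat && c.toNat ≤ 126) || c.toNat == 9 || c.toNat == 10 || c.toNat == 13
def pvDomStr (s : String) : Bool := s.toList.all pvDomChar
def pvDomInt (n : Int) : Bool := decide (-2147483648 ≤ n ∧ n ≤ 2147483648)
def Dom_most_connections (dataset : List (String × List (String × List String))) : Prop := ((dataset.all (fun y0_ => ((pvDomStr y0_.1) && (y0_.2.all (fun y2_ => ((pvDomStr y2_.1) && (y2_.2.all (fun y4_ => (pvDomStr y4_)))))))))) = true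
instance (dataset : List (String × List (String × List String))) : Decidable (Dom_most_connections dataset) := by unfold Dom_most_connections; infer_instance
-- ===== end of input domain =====

-- B replaces A's single accumulating scan (running max with append/reset list state)
-- by an empty guard, a max() pass and a filter at the final maximum (simpler decomposition).

-- len(dataset[k]["linien"]) — both Pythons evaluate exactly this expression; the getD []
-- defaults are unreachable under Pre_most_connections (key present), where Python would raise KeyError.
def pvLinLen (dataset : List (String × List (String × List String))) (k : String) : Int :=
  (((PySem.Dict.mk ((PySem.Dict.mk dataset).get? k |>.getD [])).get? "linien").getD []).length

-- step of A's loop: the two ifs of the Python loop body, verbatim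
def pvStepA {α β : Type} (f : α → Int) (g : α → β) (st : Int × List β) (x : α) : Int × List β :=
  let n := f x
  let st1 := if n = st.1 then (st.1, st.2 ++ [g x]) else st
  if n > st1.1 then (n, [g x]) else st1

-- ===== PORT A =====
def most_connections (dataset : List (String × List (String × List String))) : Int × List String :=
  dataset.foldl (pvStepA (fun kv => pvLinLen dataset kv.1) Prod.fst) (0, [])

-- ===== PORT B =====
def most_connections_alt (dataset : List (String × List (String × List String))) : Int × List String :=
  if dataset.isEmpty then (0, [])
  else
    let m := (PySem.List.max? (dataset.map (fun kv => pvLinLen dataset kv.1)) (fun y => y)).getD 0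
    (m, (dataset.filter (fun kv => pvLinLen dataset kv.1 == m)).map Prod.fst)

-- ===== PRECONDITION & SPEC =====
-- Pre_ excludes datasets whose outer or inner key lists have duplicates (not representable as a
-- Python dict) and entries whose inner dict lacks the key "linien" (Python A raises KeyError there).
def Pre_most_connections (dataset : List (String × List (String × List String))) : Prop :=
  (dataset.map Prod.fst).Nodup ∧
  ∀ kv ∈ dataset, (kv.2.map Prod.fst).Nodup ∧ "linien" ∈ kv.2.map Prod.fst
instance (dataset : List (String × List (String × List String))) : Decidable (Pre_most_connections dataset) := by unfold Pre_most_connections; infer_instance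

def pvWitness_most_connections : (List (String × List (String × List String))) :=
  [("57", [("linien", ["1", "7"])]), ("58", [("linien", ["7"])])]

def Spec_most_connections (dataset : List (String × List (String × List String))) (out : Int × List String) : Prop := out = most_connections_alt dataset
instance (dataset : List (String × List (String × List String))) (out : Int × List String) : Decidable (Spec_most_connections dataset out) := by unfold Spec_most_connections; infer_instance

-- ===== CLAIM (what is proved, stated in full; the proofs are below) =====
def Claim_equal_most_connections : Prop := ∀ (dataset : List (String × List (String × List String))), Dom_most_connections dataset → Pre_most_connections dataset → Spec_most_connections dataset (most_connections dataset)

-- ===== LEMMAS AND PROOFS =====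
theorem pvStepA_lt {α β : Type} (f : α → Int) (g : α → β) (c : Int) (acc : List β) (x : α)
    (h : f x < c) : pvStepA f g (c, acc) x = (c, acc) := by
  have h1 : ¬ (f x = c) := by omega
  have h2 : ¬ (f x > c) := by omega
  simp [pvStepA, h1, h2]

theorem pvStepA_eq {α β : Type} (f : α → Int) (g : α → β) (c : Int) (acc : List β) (x : α)
    (h : f x = c) : pvStepA f g (c, acc) x = (c, acc ++ [g x]) := by
  simp [pvStepA, h]

theorem pvStepA_gt {α β : Type} (f : α → Int) (g : α → β) (c : Int) (acc : List β) (x : α)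
    (h : f x > c) : pvStepA f g (c, acc) x = (f x, [g x]) := by
  have h1 : ¬ (f x = c) := by omega
  simp [pvStepA, h1, h]

-- Characterisation of A's accumulating loop: from any state (c, acc) it ends at the running
-- maximum M, the old acc surviving iff the maximum never strictly increased, followed by the
-- g-images of the elements whose value equals M.
theorem pvLoop_char {α β : Type} (f : α → Int) (g : α → β) :
    ∀ (l : List α) (c : Int) (acc : List β),
      l.foldl (pvStepA f g) (c, acc)
      = (l.foldl (fun m x => max m (f x)) c,
         (if l.foldl (fun m x => max m (f x)) c = c then acc else []) ++
           (l.filter (fun x => f x == l.foldl (fun m x => max m (f x)) c)).map g) := by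
  intro l
  induction l with
  | nil => intro c acc; simp
  | cons x xs ih =>
    intro c acc
    rcases lt_trichotomy (f x) c with hlt | heq | hgt
    · have hmax : max c (f x) = c := by omega
      rw [List.foldl_cons, pvStepA_lt f g c acc x hlt]
      simp only [List.foldl_cons, hmax]
      rw [ih c acc, List.filter_cons]
      have hM := (PySem.List.le_foldl_max_int xs f c).1
      rw [if_neg (show ¬ ((f x == xs.foldl (fun m x => max m (f x)) c) = true) by
        simp only [beq_iff_eq]; omega)]
    · have hmax : max c (f x) = c := by omega
      rw [List.foldl_cons, pvStepA_eq f g c acc x heq]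
      simp only [List.foldl_cons, hmax]
      rw [ih c (acc ++ [g x]), List.filter_cons]
      by_cases hM : xs.foldl (fun m x => max m (f x)) c = c
      · rw [if_pos hM, if_pos hM, if_pos (by simp [heq, hM]), List.map_cons]
        simp
      · rw [if_neg hM, if_neg hM,
          if_neg (show ¬ ((f x == xs.foldl (fun m x => max m (f x)) c) = true) by
            simp only [beq_iff_eq, heq]; exact fun h => hM h.symm)]
    · have hmax : max c (f x) = f x := by omega
      rw [List.foldl_cons, pvStepA_gt f g c acc x hgt]
      simp only [List.foldl_cons, hmax]
      rw [ih (f x) [g x], List.filter_cons]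
      have hfx := (PySem.List.le_foldl_max_int xs f (f x)).1
      rw [if_neg (show ¬ (xs.foldl (fun m x => max m (f x)) (f x) = c) by omega)]
      by_cases hM : xs.foldl (fun m x => max m (f x)) (f x) = f x
      · rw [if_pos hM, if_pos (by simp [hM]), List.map_cons]
        simp
      · rw [if_neg hM,
          if_neg (show ¬ ((f x == xs.foldl (fun m x => max m (f x)) (f x)) = true) by
            simp only [beq_iff_eq]; exact fun h => hM h.symm)]

theorem most_connections_eq_alt (dataset : List (String × List (String × List String))) :
    most_connections dataset = most_connections_alt dataset := by
  unfold most_connections most_connections_alt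
  cases dataset with
  | nil => simp
  | cons kv rest =>
    rw [pvLoop_char (fun kv' => pvLinLen (kv :: rest) kv'.1) Prod.fst (kv :: rest) 0 []]
    have hnn : (0 : Int) ≤ pvLinLen (kv :: rest) kv.1 := Int.natCast_nonneg _
    have hmax0 : (kv :: rest).foldl (fun m kv' => max m (pvLinLen (kv :: rest) kv'.1)) 0
        = rest.foldl (fun m kv' => max m (pvLinLen (kv :: rest) kv'.1))
            (pvLinLen (kv :: rest) kv.1) := by
      rw [List.foldl_cons, max_eq_right hnn]
    have hB : (PySem.List.max? ((kv :: rest).map (fun kv' => pvLinLen (kv :: rest) kv'.1))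
          (fun y => y)).getD 0
        = rest.foldl (fun m kv' => max m (pvLinLen (kv :: rest) kv'.1))
            (pvLinLen (kv :: rest) kv.1) := by
      rw [List.map_cons, PySem.List.max?_id_cons, Option.getD_some, List.foldl_map]
    simp only [List.isEmpty_cons, if_false, Bool.false_eq_true, hB, hmax0, ite_self,
      List.nil_append]

-- ===== VERDICT (by name: the statement is the Claim_ definition above) =====
theorem most_connections_spec : Claim_equal_most_connections := by
  intro dataset _ _
  unfold Spec_most_connections
  exact most_connections_eq_alt dataset
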